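-- pv_equiv track=rewrite | github.com/yannmo20/pointnet-implementation | create_data/vru_notvru.py | invert_interval_bounderies
-- ===== SOURCE A (Python) =====
-- def invert_interval_bounderies(obj_list, base_interval):
--     if not obj_list:
--         return [base_interval]
--
--     else:
--         previous_right_border = base_interval[0]
--         inverted_interval = []
--
--         obj_list.append([base_interval[1], base_interval[1]])
--
--         for obj in obj_list:
--             new_border_right = obj[0]
--             new_border_left = previous_right_border
--             previous_right_border = obj[1]
--             inverted_interval.append([new_border_left, new_border_right])
--
--         return inverted_interval
-- ===== SOURCE B (Python) =====
-- def invert_interval_bounderies(obj_list, base_interval):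
--     # Same mutation as A: appends the sentinel to obj_list in place.
--     if not obj_list:
--         return [base_interval]
--
--     obj_list.append([base_interval[1], base_interval[1]])
--
--     boundaries = [base_interval[0]]
--     for obj in obj_list:
--         boundaries += [obj[0], obj[1]]
--
--     return [[boundaries[2 * i], boundaries[2 * i + 1]] for i in range(len(obj_list))]
-- ===== Notes on version B (the rewrite author's own statement) =====
-- stated objective: alternative
-- what changed: Replaces the previous_right_border accumulator loop by a flatten-then-pair scheme: one flat boundary list [base[0], obj0[0], obj0[1], ...] is built and the result pairs consecutive boundaries two at a time.
import Mathlib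
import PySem

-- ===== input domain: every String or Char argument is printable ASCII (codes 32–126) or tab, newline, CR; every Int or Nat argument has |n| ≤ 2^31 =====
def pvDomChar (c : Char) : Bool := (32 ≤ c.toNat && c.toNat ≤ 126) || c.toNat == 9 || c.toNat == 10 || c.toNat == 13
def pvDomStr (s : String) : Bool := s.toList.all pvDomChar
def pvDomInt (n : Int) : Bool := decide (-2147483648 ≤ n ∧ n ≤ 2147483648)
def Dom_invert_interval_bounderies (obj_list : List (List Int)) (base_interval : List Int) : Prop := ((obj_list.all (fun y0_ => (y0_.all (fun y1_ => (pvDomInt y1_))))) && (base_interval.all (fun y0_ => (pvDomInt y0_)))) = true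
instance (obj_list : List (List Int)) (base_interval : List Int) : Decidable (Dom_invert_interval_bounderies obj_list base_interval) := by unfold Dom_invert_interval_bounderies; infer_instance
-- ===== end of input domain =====

-- B replaces A's previous_right_border accumulator by flatten-then-pair over one flat boundary
-- list (alternative decomposition, same cost); both mutate obj_list identically in Python, the
-- equivalence proved is about the return value.

-- ===== PORT A =====
def invert_interval_bounderies (obj_list : List (List Int)) (base_interval : List Int) : List (List Int) :=
  if obj_list = [] then [base_interval]
  else
    let previous_right_border := PySem.List.pyGetD base_interval 0 0
    let b1 := PySem.List.pyGetD base_interval 1 0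
    let objs := obj_list ++ [[b1, b1]]
    (objs.foldl (fun (s : Int × List (List Int)) obj =>
        (PySem.List.pyGetD obj 1 0, s.2 ++ [[s.1, PySem.List.pyGetD obj 0 0]]))
      (previous_right_border, [])).2

-- ===== PORT B =====
def invert_interval_bounderies_alt (obj_list : List (List Int)) (base_interval : List Int) : List (List Int) :=
  if obj_list = [] then [base_interval]
  else
    let b1 := PySem.List.pyGetD base_interval 1 0
    let objs := obj_list ++ [[b1, b1]]
    let boundaries := objs.foldl
      (fun acc obj => acc ++ [PySem.List.pyGetD obj 0 0, PySem.List.pyGetD obj 1 0])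
      [PySem.List.pyGetD base_interval 0 0]
    (PySem.List.pyRange 0 (objs.length : Int) 1).map
      (fun i => [PySem.List.pyGetD boundaries (2 * i) 0, PySem.List.pyGetD boundaries (2 * i + 1) 0])

-- ===== PRECONDITION & SPEC =====
-- A raises IndexError when obj_list is non-empty and base_interval or some obj has fewer than 2 elements.
def Pre_invert_interval_bounderies (obj_list : List (List Int)) (base_interval : List Int) : Prop :=
  obj_list = [] ∨ (2 ≤ base_interval.length ∧ ∀ o ∈ obj_list, 2 ≤ o.length)
instance (obj_list : List (List Int)) (base_interval : List Int) : Decidable (Pre_invert_interval_bounderies obj_list base_interval) := by unfold Pre_invert_interval_bounderies; infer_instance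

def pvWitness_invert_interval_bounderies : List (List Int) × List Int := ([[1, 2], [4, 6]], [0, 9])

def Spec_invert_interval_bounderies (obj_list : List (List Int)) (base_interval : List Int) (out : List (List Int)) : Prop := out = invert_interval_bounderies_alt obj_list base_interval
instance (obj_list : List (List Int)) (base_interval : List Int) (out : List (List Int)) : Decidable (Spec_invert_interval_bounderies obj_list base_interval out) := by unfold Spec_invert_interval_bounderies; infer_instance

-- ===== CLAIM (what is proved, stated in full; the proofs are below) =====
def Claim_equal_invert_interval_bounderies : Prop := ∀ (obj_list : List (List Int)) (base_interval : List Int), Dom_invert_interval_bounderies obj_list base_interval → Pre_invert_interval_bounderies obj_list base_interval → Spec_invert_interval_bounderies obj_list base_interval (invert_interval_bounderies obj_list base_interval)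

-- ===== LEMMAS AND PROOFS =====

-- A's loop, with the accumulator pulled out front.
theorem afold_acc (objs : List (List Int)) (p : Int) (acc : List (List Int)) :
    (objs.foldl (fun (s : Int × List (List Int)) obj =>
        (PySem.List.pyGetD obj 1 0, s.2 ++ [[s.1, PySem.List.pyGetD obj 0 0]])) (p, acc)).2
    = acc ++ (objs.foldl (fun (s : Int × List (List Int)) obj =>
        (PySem.List.pyGetD obj 1 0, s.2 ++ [[s.1, PySem.List.pyGetD obj 0 0]])) (p, [])).2 := by
  induction objs generalizing p acc with
  | nil => simp
  | cons o t ih =>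
    simp only [List.foldl_cons]
    rw [ih, ih (PySem.List.pyGetD o 1 0) ([] ++ [[p, PySem.List.pyGetD o 0 0]])]
    simp

-- Pairing consecutive entries of the flat boundary list reproduces A's loop.
theorem pair_eq_afold (objs : List (List Int)) (p : Int) :
    (List.range objs.length).map
      (fun i => [(p :: objs.flatMap (fun o => [PySem.List.pyGetD o 0 0, PySem.List.pyGetD o 1 0])).getD (2 * i) 0,
                 (p :: objs.flatMap (fun o => [PySem.List.pyGetD o 0 0, PySem.List.pyGetD o 1 0])).getD (2 * i + 1) 0])
    = (objs.foldl (fun (s : Int × List (List Int)) obj =>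
        (PySem.List.pyGetD obj 1 0, s.2 ++ [[s.1, PySem.List.pyGetD obj 0 0]])) (p, [])).2 := by
  induction objs generalizing p with
  | nil => simp
  | cons o t ih =>
    rw [List.length_cons, List.range_succ_eq_map]
    simp only [List.foldl_cons, List.map_cons, List.map_map, List.flatMap_cons]
    rw [afold_acc, List.nil_append]
    show _ :: _ = _ :: _
    congr 1
    rw [← ih (PySem.List.pyGetD o 1 0)]
    apply List.map_congr_left
    intro i _
    simp only [Function.comp_apply, Nat.succ_eq_add_one, List.cons_append, List.nil_append]
    rw [show 2 * (i + 1) = 2 * i + 1 + 1 from by ring]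
    simp only [List.getD_cons_succ]

theorem invert_eq_alt (obj_list : List (List Int)) (base_interval : List Int) :
    invert_interval_bounderies obj_list base_interval
    = invert_interval_bounderies_alt obj_list base_interval := by
  unfold invert_interval_bounderies invert_interval_bounderies_alt
  by_cases h : obj_list = []
  · simp [h]
  · simp only [h, ite_false]
    rw [PySem.List.foldl_append_eq_flatMap, PySem.List.pyRange_zero_natCast]
    rw [← pair_eq_afold]
    rw [List.map_map]
    apply List.map_congr_left
    intro i _
    simp only [Function.comp_apply]
    rw [show ((2 : Int) * (i : Int)) = ((2 * i : Nat) : Int) from by push_cast; ring,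
        show (((2 * i : Nat) : Int) + 1) = ((2 * i + 1 : Nat) : Int) from by push_cast; ring,
        PySem.List.pyGetD_natCast, PySem.List.pyGetD_natCast, List.singleton_append]

-- ===== VERDICT (by name: the statement is the Claim_ definition above) =====
theorem invert_interval_bounderies_spec : Claim_equal_invert_interval_bounderies := by
  intro obj_list base_interval _ _
  exact invert_eq_alt obj_list base_interval
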